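-- pv_equiv track=rewrite | github.com/Abd210/BioInformatics | lab11/ex2_3.py | extract_match_segments
-- ===== SOURCE A (Python) =====
-- def extract_match_segments(a1: str, a2: str, min_run: int = 50):
--     segs = []
--     posA = 0
--     posB = 0
--     run_startA = None
--     run_startB = None
--     run_len = 0
--
--     for x, y in zip(a1, a2):
--         advA = (x != '-')
--         advB = (y != '-')
--         is_match = (x != '-' and y != '-' and x == y and x != 'N')
--
--         if is_match:
--             if run_len == 0:
--                 run_startA = posA
--                 run_startB = posB
--             run_len += 1
--         else:
--             if run_len >= min_run:
--                 segs.append((run_startA, run_startB, run_len))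
--             run_len = 0
--             run_startA = None
--             run_startB = None
--
--         if advA:
--             posA += 1
--         if advB:
--             posB += 1
--
--     if run_len >= min_run:
--         segs.append((run_startA, run_startB, run_len))
--
--     return segs
-- ===== SOURCE B (Python) =====
-- def extract_match_segments(a1: str, a2: str, min_run: int = 50):
--     def is_match(x, y):
--         return x != '-' and y != '-' and x == y and x != 'N'
--     cols = list(zip(a1, a2))
--     n = len(cols)
--     segs = []
--     posA = 0
--     posB = 0
--     i = 0
--     while i < n:
--         x, y = cols[i]
--         if is_match(x, y):
--             j = i + 1
--             while j < n and is_match(cols[j][0], cols[j][1]):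
--                 j += 1
--             t = j - i
--             if t >= min_run:
--                 segs.append((posA, posB, t))
--             posA += t
--             posB += t
--             i = j
--         else:
--             posA += (x != '-')
--             posB += (y != '-')
--             i += 1
--     return segs
-- ===== Notes on version B (the rewrite author's own statement) =====
-- stated objective: alternative
-- what changed: Replaced A's per-column state machine (run_start/run_len accumulator with a final flush) by a run-skipping scan that, at each matching column, consumes the whole maximal run at once (inner index jump), emitting the segment immediately and advancing both positions by the run length.
-- outside the precondition, e.g. on extract_match_segments('A', 'B', 0): A returns [(None, None, 0), (None, None, 0)], B returns []; on extract_match_segments('A', 'A', 0): A returns [(0, 0, 1)], B returns [(0, 0, 1)]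
import Mathlib
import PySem

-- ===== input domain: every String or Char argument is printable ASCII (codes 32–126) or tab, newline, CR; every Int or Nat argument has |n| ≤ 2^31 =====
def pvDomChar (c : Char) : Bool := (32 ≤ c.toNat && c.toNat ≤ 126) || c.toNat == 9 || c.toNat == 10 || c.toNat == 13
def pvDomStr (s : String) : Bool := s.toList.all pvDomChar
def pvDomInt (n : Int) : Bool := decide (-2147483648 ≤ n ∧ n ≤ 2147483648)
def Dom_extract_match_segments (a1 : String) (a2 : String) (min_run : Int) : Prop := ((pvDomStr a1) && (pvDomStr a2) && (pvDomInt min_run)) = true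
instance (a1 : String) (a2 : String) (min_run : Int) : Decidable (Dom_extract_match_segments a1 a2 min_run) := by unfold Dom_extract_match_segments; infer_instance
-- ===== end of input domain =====

-- B replaces A's per-column running-state accumulator by a run-skipping scan that consumes each
-- maximal match run at once; same O(n) cost, different decomposition.

-- ===== PORT A =====
def pvIsMatchA (x : Char) (y : Char) : Bool := x ≠ '-' && y ≠ '-' && x == y && x ≠ 'N'

-- state: (segs, posA, posB, run_startA, run_startB, run_len)
def pvStepA (min_run : Int)
    (st : List (Int × Int × Int) × Int × Int × Option Int × Option Int × Int)
    (c : Char × Char) : List (Int × Int × Int) × Int × Int × Option Int × Option Int × Int :=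
  match st, c with
  | (segs, posA, posB, rsA, rsB, rl), (x, y) =>
    let advA : Bool := x ≠ '-'
    let advB : Bool := y ≠ '-'
    let isMatch : Bool := pvIsMatchA x y
    let (segs', rsA', rsB', rl') :=
      if isMatch then
        (segs, (if rl = 0 then some posA else rsA), (if rl = 0 then some posB else rsB), rl + 1)
      else
        ((if min_run ≤ rl then segs ++ [(rsA.getD 0, rsB.getD 0, rl)] else segs), none, none, 0)
    (segs', posA + (if advA then 1 else 0), posB + (if advB then 1 else 0), rsA', rsB', rl')

def extract_match_segments (a1 : String) (a2 : String) (min_run : Int) : List (Int × Int × Int) :=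
  match (List.zip a1.toList a2.toList).foldl (pvStepA min_run) ([], 0, 0, none, none, 0) with
  | (segs, _, _, rsA, rsB, rl) =>
      if min_run ≤ rl then segs ++ [(rsA.getD 0, rsB.getD 0, rl)] else segs

-- ===== PORT B =====
def pvIsMatchB (x : Char) (y : Char) : Bool := x ≠ '-' && y ≠ '-' && x == y && x ≠ 'N'

def pvGoB (min_run : Int) : List (Char × Char) → Int → Int → List (Int × Int × Int)
  | [], _, _ => []
  | (x, y) :: rest, posA, posB =>
    if pvIsMatchB x y then
      let t : Int := 1 + (rest.takeWhile (fun p => pvIsMatchB p.1 p.2)).length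
      let rest' := rest.dropWhile (fun p => pvIsMatchB p.1 p.2)
      (if min_run ≤ t then [(posA, posB, t)] else []) ++ pvGoB min_run rest' (posA + t) (posB + t)
    else
      pvGoB min_run rest (posA + (if x ≠ '-' then 1 else 0)) (posB + (if y ≠ '-' then 1 else 0))
termination_by cols => cols.length
decreasing_by
  · exact Nat.lt_succ_of_le (List.length_dropWhile_le _ _)
  · simp

def extract_match_segments_alt (a1 : String) (a2 : String) (min_run : Int) : List (Int × Int × Int) :=
  pvGoB min_run (List.zip a1.toList a2.toList) 0 0

-- ===== PRECONDITION & SPEC =====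
-- Pre_ excludes min_run ≤ 0, on which A's appended tuples can be (None, None, 0) — values outside
-- the declared int-triple result type (this happens at every non-matching column and at the final flush).
def Pre_extract_match_segments (a1 : String) (a2 : String) (min_run : Int) : Prop := 1 ≤ min_run
instance (a1 : String) (a2 : String) (min_run : Int) : Decidable (Pre_extract_match_segments a1 a2 min_run) := by unfold Pre_extract_match_segments; infer_instance
def pvWitness_extract_match_segments : String × String × Int := ("ACG-T", "ACGGT", 2)

def Spec_extract_match_segments (a1 : String) (a2 : String) (min_run : Int) (out : List (Int × Int × Int)) : Prop := out = extract_match_segments_alt a1 a2 min_run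
instance (a1 : String) (a2 : String) (min_run : Int) (out : List (Int × Int × Int)) : Decidable (Spec_extract_match_segments a1 a2 min_run out) := by unfold Spec_extract_match_segments; infer_instance

-- ===== CLAIM (what is proved, stated in full; the proofs are below) =====
def Claim_equal_extract_match_segments : Prop := ∀ (a1 : String) (a2 : String) (min_run : Int), Dom_extract_match_segments a1 a2 min_run → Pre_extract_match_segments a1 a2 min_run → Spec_extract_match_segments a1 a2 min_run (extract_match_segments a1 a2 min_run)

-- ===== LEMMAS AND PROOFS =====

-- the final flush of A's state
def pvFlush (min_run : Int)
    (st : List (Int × Int × Int) × Int × Int × Option Int × Option Int × Int) : List (Int × Int × Int) :=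
  match st with
  | (segs, _, _, rsA, rsB, rl) =>
      if min_run ≤ rl then segs ++ [(rsA.getD 0, rsB.getD 0, rl)] else segs

-- main invariant, proved mutually by strong induction on the length of cols:
--  (i) starting with no open run, A's remaining fold+flush equals segs0 ++ pvGoB cols posA posB;
--  (ii) starting inside an open run of length k ≥ 1 started at (sA, sB), the run is completed
--       by the leading takeWhile block and the rest restarts with no open run.
theorem pvMainRun (min_run : Int) (hmr : 1 ≤ min_run) :
    ∀ (n : ℕ) (cols : List (Char × Char)), cols.length ≤ n →
      (∀ (segs0 : List (Int × Int × Int)) (posA posB : Int),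
        pvFlush min_run (cols.foldl (pvStepA min_run) (segs0, posA, posB, none, none, 0))
          = segs0 ++ pvGoB min_run cols posA posB) ∧
      (∀ (segs0 : List (Int × Int × Int)) (posA posB sA sB : Int) (k : Int), 1 ≤ k →
        pvFlush min_run (cols.foldl (pvStepA min_run) (segs0, posA, posB, some sA, some sB, k))
          = (if min_run ≤ k + ((cols.takeWhile (fun p => pvIsMatchB p.1 p.2)).length : Int)
              then segs0 ++ [(sA, sB, k + ((cols.takeWhile (fun p => pvIsMatchB p.1 p.2)).length : Int))]
              else segs0)
            ++ pvGoB min_run (cols.dropWhile (fun p => pvIsMatchB p.1 p.2))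
                (posA + ((cols.takeWhile (fun p => pvIsMatchB p.1 p.2)).length : Int))
                (posB + ((cols.takeWhile (fun p => pvIsMatchB p.1 p.2)).length : Int))) := by
  intro n
  induction n with
  | zero =>
    intro cols hlen
    have hnil : cols = [] := List.eq_nil_of_length_eq_zero (Nat.le_zero.mp hlen)
    subst hnil
    constructor
    · intro segs0 posA posB
      simp only [List.foldl_nil, pvFlush, pvGoB, List.append_nil]
      rw [if_neg (by omega)]
    · intro segs0 posA posB sA sB k hk
      simp [pvFlush, pvGoB]
  | succ m ih =>
    intro cols hlen
    match cols with
    | [] =>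
      constructor
      · intro segs0 posA posB
        simp only [List.foldl_nil, pvFlush, pvGoB, List.append_nil]
        rw [if_neg (by omega)]
      · intro segs0 posA posB sA sB k hk
        simp [pvFlush, pvGoB]
    | (x, y) :: rest =>
      have hrest : rest.length ≤ m := by simpa using Nat.succ_le_succ_iff.mp hlen
      constructor
      · intro segs0 posA posB
        by_cases hm : pvIsMatchA x y = true
        · -- first column matches: a run of length 1 opens; both positions advance
          have hmB : pvIsMatchB x y = true := hm
          obtain ⟨⟨⟨hx, hy⟩, he⟩, hN⟩ : ((x ≠ '-' ∧ y ≠ '-') ∧ x = y) ∧ ¬ x = 'N' := by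
            simpa [pvIsMatchA, and_assoc] using hm
          have h2 := (ih rest hrest).2 segs0 (posA + 1) (posB + 1) posA posB 1 (le_refl 1)
          rw [List.foldl_cons]
          have hstep : pvStepA min_run (segs0, posA, posB, none, none, 0) (x, y)
              = (segs0, posA + 1, posB + 1, some posA, some posB, 1) := by
            simp [pvStepA, hm, hx, hy]
          rw [hstep, h2]
          have hgo : pvGoB min_run ((x, y) :: rest) posA posB
              = (if min_run ≤ 1 + ((rest.takeWhile (fun p => pvIsMatchB p.1 p.2)).length : Int)
                  then [(posA, posB, 1 + ((rest.takeWhile (fun p => pvIsMatchB p.1 p.2)).length : Int))] else [])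
                ++ pvGoB min_run (rest.dropWhile (fun p => pvIsMatchB p.1 p.2))
                    (posA + (1 + ((rest.takeWhile (fun p => pvIsMatchB p.1 p.2)).length : Int)))
                    (posB + (1 + ((rest.takeWhile (fun p => pvIsMatchB p.1 p.2)).length : Int))) := by
            rw [pvGoB]
            simp [hmB]
          rw [hgo]
          rw [show posA + 1 + ((rest.takeWhile (fun p => pvIsMatchB p.1 p.2)).length : Int)
                = posA + (1 + ((rest.takeWhile (fun p => pvIsMatchB p.1 p.2)).length : Int)) from by ring,
              show posB + 1 + ((rest.takeWhile (fun p => pvIsMatchB p.1 p.2)).length : Int)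
                = posB + (1 + ((rest.takeWhile (fun p => pvIsMatchB p.1 p.2)).length : Int)) from by ring]
          split <;> simp
        · -- first column does not match: nothing is emitted (run_len = 0 < min_run)
          have hmB : pvIsMatchB x y = false := by
            have := eq_false_of_ne_true hm
            exact this
          have h1 := (ih rest hrest).1 segs0
            (posA + (if x ≠ '-' then 1 else 0)) (posB + (if y ≠ '-' then 1 else 0))
          rw [List.foldl_cons]
          have hmA : pvIsMatchA x y = false := eq_false_of_ne_true hm
          have hstep : pvStepA min_run (segs0, posA, posB, none, none, 0) (x, y)
              = (segs0, posA + (if x ≠ '-' then (1:Int) else 0), posB + (if y ≠ '-' then (1:Int) else 0), none, none, 0) := by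
            simp [pvStepA, hmA, show ¬ (min_run ≤ (0:Int)) from by omega]
          rw [hstep, h1]
          rw [pvGoB]
          simp [hmB]
      · intro segs0 posA posB sA sB k hk
        by_cases hm : pvIsMatchA x y = true
        · -- run continues through this column
          have hmB : pvIsMatchB x y = true := hm
          obtain ⟨⟨⟨hx, hy⟩, he⟩, hN⟩ : ((x ≠ '-' ∧ y ≠ '-') ∧ x = y) ∧ ¬ x = 'N' := by
            simpa [pvIsMatchA, and_assoc] using hm
          have h2 := (ih rest hrest).2 segs0 (posA + 1) (posB + 1) sA sB (k + 1) (by omega)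
          rw [List.foldl_cons]
          have hstep : pvStepA min_run (segs0, posA, posB, some sA, some sB, k) (x, y)
              = (segs0, posA + 1, posB + 1, some sA, some sB, k + 1) := by
            simp [pvStepA, hm, hx, hy]
            omega
          rw [hstep, h2]
          simp only [List.takeWhile_cons, List.dropWhile_cons, hmB, if_true, List.length_cons]
          rw [show ((((rest.takeWhile (fun p => pvIsMatchB p.1 p.2)).length + 1 : Nat) : Int))
                = 1 + ((rest.takeWhile (fun p => pvIsMatchB p.1 p.2)).length : Int) from by push_cast; ring]
          rw [show k + 1 + ((rest.takeWhile (fun p => pvIsMatchB p.1 p.2)).length : Int)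
                = k + (1 + ((rest.takeWhile (fun p => pvIsMatchB p.1 p.2)).length : Int)) from by ring,
              show posA + 1 + ((rest.takeWhile (fun p => pvIsMatchB p.1 p.2)).length : Int)
                = posA + (1 + ((rest.takeWhile (fun p => pvIsMatchB p.1 p.2)).length : Int)) from by ring,
              show posB + 1 + ((rest.takeWhile (fun p => pvIsMatchB p.1 p.2)).length : Int)
                = posB + (1 + ((rest.takeWhile (fun p => pvIsMatchB p.1 p.2)).length : Int)) from by ring]
        · -- run ends at this column
          have hmB : pvIsMatchB x y = false := eq_false_of_ne_true hm
          have h1 := (ih rest hrest).1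
            (if min_run ≤ k then segs0 ++ [(sA, sB, k)] else segs0)
            (posA + (if x ≠ '-' then 1 else 0)) (posB + (if y ≠ '-' then 1 else 0))
          rw [List.foldl_cons]
          have hstep : pvStepA min_run (segs0, posA, posB, some sA, some sB, k) (x, y)
              = ((if min_run ≤ k then segs0 ++ [(sA, sB, k)] else segs0),
                 posA + (if x ≠ '-' then (1:Int) else 0), posB + (if y ≠ '-' then (1:Int) else 0), none, none, 0) := by
            have hmA : pvIsMatchA x y = false := eq_false_of_ne_true hm
            simp [pvStepA, hmA]
          rw [hstep, h1]
          simp only [List.takeWhile_cons, List.dropWhile_cons, hmB, if_false, Bool.false_eq_true,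
            List.length_nil, Int.natCast_zero, add_zero]
          rw [pvGoB]
          simp [hmB]

-- ===== VERDICT (by name: the statement is the Claim_ definition above) =====
theorem extract_match_segments_spec : Claim_equal_extract_match_segments := by
  intro a1 a2 min_run _ hpre
  unfold Spec_extract_match_segments extract_match_segments extract_match_segments_alt
  have h := (pvMainRun min_run hpre (List.zip a1.toList a2.toList).length
      (List.zip a1.toList a2.toList) (le_refl _)).1 [] 0 0
  simpa [pvFlush] using h
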